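-- pv_equiv track=rewrite | github.com/ildarius116/Yandex_Contest | lesson_checkmate.py | checkmate2
-- ===== SOURCE A (Python) =====
-- def checkmate2(figures):
--     def add_figure(rowcol, key):
--         if key not in rowcol:
--             rowcol[key] = 0
--         rowcol[key] += 1
--
--     def count_pairs(rowcol):
--         pairs = 0
--         for key in rowcol:
--             pairs += rowcol[key] - 1
--         return pairs
--
--     figures_in_di_up = {}
--     figures_in_di_down = {}
--     for row, col in figures:
--         add_figure(figures_in_di_up, row + col)
--         add_figure(figures_in_di_down, row - col)
--     return count_pairs(figures_in_di_up) + count_pairs(figures_in_di_down)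
-- ===== SOURCE B (Python) =====
-- def checkmate2(figures):
--     total = 0
--     for diag in (sorted(r + c for r, c in figures),
--                  sorted(r - c for r, c in figures)):
--         total += sum(1 for a, b in zip(diag, diag[1:]) if a == b)
--     return total
-- ===== Notes on version B (the rewrite author's own statement) =====
-- stated objective: alternative
-- what changed: Replaces the hash-counting approach (two counting dicts plus a per-key (count-1) summation pass) with sort-then-scan: sort each list of diagonal ids and count adjacent equal neighbours, so no counting containers exist at all.
import Mathlib
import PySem

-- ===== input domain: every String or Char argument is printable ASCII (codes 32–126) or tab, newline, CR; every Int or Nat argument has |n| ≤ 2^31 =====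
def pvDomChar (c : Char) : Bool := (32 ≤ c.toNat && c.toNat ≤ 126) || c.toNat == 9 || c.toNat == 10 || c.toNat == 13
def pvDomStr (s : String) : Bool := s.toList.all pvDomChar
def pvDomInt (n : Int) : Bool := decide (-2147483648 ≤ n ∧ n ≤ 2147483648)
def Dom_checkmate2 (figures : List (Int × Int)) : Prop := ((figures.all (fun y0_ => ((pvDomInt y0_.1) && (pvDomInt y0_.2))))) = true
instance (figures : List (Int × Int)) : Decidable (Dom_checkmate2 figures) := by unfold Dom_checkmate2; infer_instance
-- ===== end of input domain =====

-- B replaces A's hash counting (two counting dicts + a (count-1) summation pass) with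
-- sort-then-scan: sort each diagonal-id list and count adjacent equal neighbours.

-- ===== PORT A =====
-- def add_figure(rowcol, key): if key not in rowcol: rowcol[key] = 0; rowcol[key] += 1
def pvAddFigure (rowcol : PySem.Dict Int Int) (key : Int) : PySem.Dict Int Int :=
  let rowcol := if rowcol.contains key then rowcol else rowcol.insert key 0
  rowcol.insert key (rowcol.getD key 0 + 1)

-- def count_pairs(rowcol): pairs = 0; for key in rowcol: pairs += rowcol[key] - 1; return pairs
def pvCountPairs (rowcol : PySem.Dict Int Int) : Int :=
  rowcol.keys.foldl (fun pairs key => pairs + (rowcol.getD key 0 - 1)) 0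

def checkmate2 (figures : List (Int × Int)) : Int :=
  let dicts := figures.foldl
    (fun (d : PySem.Dict Int Int × PySem.Dict Int Int) rc =>
      (pvAddFigure d.1 (rc.1 + rc.2), pvAddFigure d.2 (rc.1 - rc.2)))
    (PySem.Dict.empty, PySem.Dict.empty)
  pvCountPairs dicts.1 + pvCountPairs dicts.2

-- ===== PORT B =====
-- sum(1 for a, b in zip(diag, diag[1:]) if a == b)
def pvAdjDups (diag : List Int) : Int :=
  (((diag.zip (PySem.List.slice diag (some 1) none)).filter (fun p => p.1 == p.2)).length : Int)

def checkmate2_alt (figures : List (Int × Int)) : Int :=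
  let d1 := PySem.List.sorted (figures.map (fun rc => rc.1 + rc.2)) (fun x => x) false
  let d2 := PySem.List.sorted (figures.map (fun rc => rc.1 - rc.2)) (fun x => x) false
  [d1, d2].foldl (fun total diag => total + pvAdjDups diag) 0

-- ===== PRECONDITION & SPEC =====
def Spec_checkmate2 (figures : List (Int × Int)) (out : Int) : Prop := out = checkmate2_alt figures
instance (figures : List (Int × Int)) (out : Int) : Decidable (Spec_checkmate2 figures out) := by unfold Spec_checkmate2; infer_instance

-- ===== CLAIM (what is proved, stated in full; the proofs are below) =====
def Claim_equal_checkmate2 : Prop := ∀ (figures : List (Int × Int)), Dom_checkmate2 figures → Spec_checkmate2 figures (checkmate2 figures)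

-- ===== LEMMAS AND PROOFS =====

-- A's add_figure is the counter-increment step.
theorem pvAddFigure_eq_modify (d : PySem.Dict Int Int) (k : Int) :
    pvAddFigure d k = d.modify k 0 (· + 1) := by
  by_cases h : d.contains k
  · simp [pvAddFigure, h, PySem.Dict.modify]
  · have hf : d.contains k = false := by revert h; cases d.contains k <;> simp
    simp only [pvAddFigure, h, Bool.false_eq_true, ite_false, PySem.Dict.modify,
      PySem.Dict.getD_insert_self, PySem.Dict.insert_insert_self,
      PySem.Dict.getD_of_not_contains d 0 hf, zero_add]

theorem pvSumSubOne (s : List Int) (f : Int → Int) :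
    (s.map (fun k => f k - (1:Int))).sum = (s.map f).sum - s.length := by
  induction s with
  | nil => simp
  | cons a t ih => simp [ih]; push_cast; ring

-- the counts over the distinct elements sum to the length of the list
theorem pvSumCounts (xs : List Int) :
    ((PySem.Set.ofList xs).map (fun k => (List.count k xs : Int))).sum = (xs.length : Int) := by
  have hperm : (PySem.Set.ofList xs).Perm xs.dedup :=
    (List.perm_ext_iff_of_nodup (PySem.Set.nodup_ofList xs) xs.nodup_dedup).2
      (by intro a; simp [PySem.Set.mem_ofList, List.mem_dedup])
  rw [(hperm.map (fun k => (List.count k xs : Int))).sum_eq]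
  calc (xs.dedup.map (fun k => (List.count k xs : Int))).sum
      = ((xs.dedup.map (fun k => List.count k xs)).sum : Int) := by
        rw [Nat.cast_list_sum, List.map_map]; rfl
    _ = (xs.length : Int) := by rw [List.sum_map_count_dedup_eq_length]

-- number of distinct elements, as the list-agnostic Finset cardinality
theorem pvOfList_length_eq_card (xs : List Int) :
    ((PySem.Set.ofList xs).length : Int) = (xs.toFinset.card : Int) := by
  have hperm : (PySem.Set.ofList xs).Perm xs.dedup :=
    (List.perm_ext_iff_of_nodup (PySem.Set.nodup_ofList xs) xs.nodup_dedup).2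
      (by intro a; simp [PySem.Set.mem_ofList, List.mem_dedup])
  rw [hperm.length_eq, List.card_toFinset]

-- summing (count-1) over the distinct keys gives n - (number of distinct keys)
theorem pvCountPairs_counter (xs : List Int) :
    pvCountPairs (PySem.Dict.counter xs) =
      (xs.length : Int) - (xs.toFinset.card : Int) := by
  unfold pvCountPairs
  rw [PySem.Dict.keys_counter, PySem.List.foldl_add]
  simp only [PySem.Dict.getD_counter]
  rw [pvSumSubOne (PySem.Set.ofList xs) (fun k => (List.count k xs : Int)), pvSumCounts,
    ← pvOfList_length_eq_card]
  ring

-- on a ≤-sorted list, the number of adjacent equal neighbours is n - (distinct count)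
theorem pvAdjDups_sorted (l : List Int) (hs : l.Pairwise (· ≤ ·)) :
    pvAdjDups l = (l.length : Int) - (l.toFinset.card : Int) := by
  unfold pvAdjDups
  rw [PySem.List.slice_from_one]
  induction l with
  | nil => simp
  | cons a t ih =>
    cases t with
    | nil => simp
    | cons b t' =>
      have hab : a ≤ b := (List.pairwise_cons.1 hs).1 b (by simp)
      have hst : (b :: t').Pairwise (· ≤ ·) := (List.pairwise_cons.1 hs).2
      have hcard_le : (b :: t').toFinset.card ≤ (b :: t').length :=
        (b :: t').toFinset_card_le
      have ih' := ih hst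
      simp only [List.tail_cons] at ih'
      by_cases heq : a = b
      · have hmem : a ∈ (b :: t').toFinset := by simp [heq]
        have h1 : (a :: b :: t').toFinset.card = (b :: t').toFinset.card := by
          rw [List.toFinset_cons, Finset.insert_eq_self.2 hmem]
        simp only [List.tail_cons, List.zip_cons_cons, List.filter_cons]
        have : (a == b) = true := by simp [heq]
        rw [this, if_pos rfl]
        simp only [List.length_cons] at ih' ⊢
        push_cast at ih' ⊢
        omega
      · have hnot : a ∉ (b :: t').toFinset := by
          simp only [List.toFinset_cons, Finset.mem_insert, List.mem_toFinset]
          push_neg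
          refine ⟨heq, fun hx => ?_⟩
          have h1 : a < b := lt_of_le_of_ne hab heq
          have h2 : b ≤ a := (List.pairwise_cons.1 hst).1 a hx
          omega
        have h1 : (a :: b :: t').toFinset.card = (b :: t').toFinset.card + 1 := by
          rw [List.toFinset_cons, Finset.card_insert_of_notMem hnot]
        simp only [List.tail_cons, List.zip_cons_cons, List.filter_cons]
        have : (a == b) = false := by simp [heq]
        rw [this, if_neg Bool.false_ne_true]
        simp only [List.length_cons] at ih' ⊢
        push_cast at ih' ⊢
        omega

-- B's per-diagonal scan, stated over the unsorted key list
theorem pvAdjDups_sorted_eq (xs : List Int) :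
    pvAdjDups (PySem.List.sorted xs (fun x => x) false) =
      (xs.length : Int) - (xs.toFinset.card : Int) := by
  have hperm := PySem.List.sorted_perm xs (fun x => x) false
  rw [pvAdjDups_sorted _ (PySem.List.sorted_pairwise xs (fun x => x)),
    hperm.length_eq, List.toFinset_eq_of_perm _ _ hperm]

-- ===== VERDICT (by name: the statement is the Claim_ definition above) =====
theorem checkmate2_spec : Claim_equal_checkmate2 := by
  intro figures _
  unfold Spec_checkmate2 checkmate2 checkmate2_alt
  rw [PySem.List.foldl_congr_mem (g := fun (d : PySem.Dict Int Int × PySem.Dict Int Int) rc =>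
        ((PySem.Dict.modify d.1 (rc.1 + rc.2) 0 (· + 1)),
         (PySem.Dict.modify d.2 (rc.1 - rc.2) 0 (· + 1))))]
  · rw [PySem.List.foldl_prod_mk
      (f := fun (d : PySem.Dict Int Int) (rc : Int × Int) => PySem.Dict.modify d (rc.1 + rc.2) 0 (· + 1))
      (g := fun (d : PySem.Dict Int Int) (rc : Int × Int) => PySem.Dict.modify d (rc.1 - rc.2) 0 (· + 1))]
    have hu : figures.foldl (fun d rc => PySem.Dict.modify d (rc.1 + rc.2) 0 (· + 1)) PySem.Dict.empty
        = PySem.Dict.counter (figures.map (fun rc => rc.1 + rc.2)) := by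
      rw [PySem.Dict.counter_eq_foldl, List.foldl_map]
    have hd : figures.foldl (fun d rc => PySem.Dict.modify d (rc.1 - rc.2) 0 (· + 1)) PySem.Dict.empty
        = PySem.Dict.counter (figures.map (fun rc => rc.1 - rc.2)) := by
      rw [PySem.Dict.counter_eq_foldl, List.foldl_map]
    simp only [hu, hd, pvCountPairs_counter, List.foldl_cons, List.foldl_nil,
      pvAdjDups_sorted_eq, List.length_map]
    ring
  · intro d rc _
    simp [pvAddFigure_eq_modify]
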